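-- pv_equiv track=rewrite | github.com/vlaspet/sloth_1.0 | mixer.py | set_dict
-- ===== SOURCE A (Python) =====
-- def set_dict(index, list):
--     """Creates new dict with dividing symbols with
--         blocks by 25 words, and by 200 a bigger block"""
--     list_index = 0
--     buffer = []
--     size = len(list)
--
--     # we're going through the all list of words
--     for x in range(size):
--         buffer.append("%s\n" % index)
--         index += 1
--         # it goes from 2 inclusive to 10
--         for i in range(2, 10):
--             for j in range(25):
--                 buffer.append("%s\n" % list[list_index])
--                 list_index += 1
--                 # it's the exit from a loop if a list index is greater
--                 # than his size
--                 if list_index >= size: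
--                     return buffer
--             # it stops adding divition to words after 8
--             if i < 9:
--                 buffer.append("*_%s_*\n" % i)
--     return buffer
-- ===== SOURCE B (Python) =====
-- def set_dict(index, list):
--     """Creates new dict with dividing symbols with
--         blocks by 25 words, and by 200 a bigger block"""
--     buffer = []
--     size = len(list)
--     # single pass over a global word position g
--     for g in range(size):
--         r = g % 200
--         if r == 0:
--             buffer.append("%s\n" % (index + g // 200))
--         buffer.append("%s\n" % list[g])
--         if g != size - 1 and r % 25 == 24 and r != 199:
--             buffer.append("*_%s_*\n" % (r // 25 + 2))
--     return buffer
-- ===== Notes on version B (the rewrite author's own statement) =====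
-- stated objective: simpler
-- what changed: Replaced the triple-nested loop with an early return buried two levels deep by a single flat loop over the global word position g, deriving header and divider placement from g % 200 arithmetic.
import Mathlib
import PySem

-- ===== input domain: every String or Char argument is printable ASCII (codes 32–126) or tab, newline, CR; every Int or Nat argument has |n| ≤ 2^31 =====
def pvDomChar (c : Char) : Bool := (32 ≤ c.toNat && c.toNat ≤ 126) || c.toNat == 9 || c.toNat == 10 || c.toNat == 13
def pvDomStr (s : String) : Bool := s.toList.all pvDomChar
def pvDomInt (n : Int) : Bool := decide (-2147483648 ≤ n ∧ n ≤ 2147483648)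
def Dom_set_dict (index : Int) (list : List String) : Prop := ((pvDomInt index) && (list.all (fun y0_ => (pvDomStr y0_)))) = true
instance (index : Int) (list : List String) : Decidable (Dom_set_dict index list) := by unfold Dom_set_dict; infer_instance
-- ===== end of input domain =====

-- B replaces A's triple-nested loop (with a mid-loop early return) by one flat loop over the
-- global word position g, placing headers/dividers by g % 200 arithmetic; objective: simpler.

-- ===== PORT A =====
-- inner `for j in range(25)` loop; `Sum.inl` models A's early `return buffer`,
-- `Sum.inr` the normal fall-through with the updated (list_index, buffer).
-- list[list_index] is ported as getD: the access is always in range here, because A checks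
-- `list_index >= size` immediately after each increment and only loops while list_index < size.
def aJ (list : List String) (size : Nat) : Nat → Nat → List String → Sum (List String) (Nat × List String)
  | 0, li, buf => Sum.inr (li, buf)
  | n + 1, li, buf =>
    let buf := buf ++ [list.getD li "" ++ "\n"]
    let li := li + 1
    if size ≤ li then Sum.inl buf
    else aJ list size n li buf

-- middle `for i in range(2, 10)` loop; fuel = 10 - i
def aI (list : List String) (size : Nat) : Nat → Nat → Nat → List String → Sum (List String) (Nat × List String)
  | 0, _, li, buf => Sum.inr (li, buf)
  | n + 1, i, li, buf =>
    match aJ list size 25 li buf with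
    | Sum.inl r => Sum.inl r
    | Sum.inr (li, buf) =>
      let buf := if i < 9 then buf ++ ["*_" ++ PySem.Int.toStr (i : Int) ++ "_*\n"] else buf
      aI list size n (i + 1) li buf

-- outer `for x in range(size)` loop; fuel = number of remaining outer iterations
def aX (list : List String) (size : Nat) : Nat → Int → Nat → List String → List String
  | 0, _, _, buf => buf
  | n + 1, index, li, buf =>
    let buf := buf ++ [PySem.Int.toStr index ++ "\n"]
    match aI list size 8 2 li buf with
    | Sum.inl r => r
    | Sum.inr (li, buf) => aX list size n (index + 1) li buf

def set_dict (index : Int) (list : List String) : List String :=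
  aX list list.length list.length index 0 []

-- ===== PORT B =====
-- single `for g in range(size)` loop of Source B; fuel = size - g
def bLoop (index : Int) (list : List String) (size : Nat) : Nat → Nat → List String → List String
  | 0, _, buf => buf
  | n + 1, g, buf =>
    let r := g % 200
    let buf := if r = 0 then buf ++ [PySem.Int.toStr (index + ((g / 200 : Nat) : Int)) ++ "\n"] else buf
    let buf := buf ++ [list.getD g "" ++ "\n"]
    let buf := if g ≠ size - 1 ∧ r % 25 = 24 ∧ r ≠ 199 then
        buf ++ ["*_" ++ PySem.Int.toStr ((r / 25 + 2 : Nat) : Int) ++ "_*\n"] else buf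
    bLoop index list size n (g + 1) buf

def set_dict_alt (index : Int) (list : List String) : List String :=
  bLoop index list list.length list.length 0 []

-- ===== PRECONDITION & SPEC =====
def Spec_set_dict (index : Int) (list : List String) (out : List String) : Prop := out = set_dict_alt index list
instance (index : Int) (list : List String) (out : List String) : Decidable (Spec_set_dict index list out) := by unfold Spec_set_dict; infer_instance

-- ===== CLAIM (what is proved, stated in full; the proofs are below) =====
def Claim_equal_set_dict : Prop := ∀ (index : Int) (list : List String), Dom_set_dict index list → Spec_set_dict index list (set_dict index list)

-- ===== LEMMAS AND PROOFS =====

-- the k words starting at position li, each with a trailing newline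
def words (list : List String) (li k : Nat) : List String :=
  (List.range k).map (fun t => list.getD (li + t) "" ++ "\n")

theorem words_succ (list : List String) (li k : Nat) :
    words list li (k + 1) = (list.getD li "" ++ "\n") :: words list (li + 1) k := by
  simp [words, List.range_succ_eq_map, List.map_map, Function.comp_def, Nat.add_comm,
    Nat.add_left_comm]

-- closed form of A's inner j-loop
theorem aJ_eq (list : List String) (size : Nat) :
    ∀ jf li buf, 1 ≤ jf → li < size →
      aJ list size jf li buf =
        if size - li ≤ jf then Sum.inl (buf ++ words list li (size - li))
        else Sum.inr (li + jf, buf ++ words list li jf) := by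
  intro jf
  induction jf with
  | zero => omega
  | succ n ih =>
    intro li buf _ hli
    rw [aJ]
    by_cases h1 : size ≤ li + 1
    · have hs : size - li = 1 := by omega
      simp [h1, hs, words]
    · simp only [if_neg (by omega : ¬ size ≤ li + 1)]
      by_cases hn : 1 ≤ n
      · rw [ih (li + 1) _ hn (by omega)]
        by_cases h2 : size - li ≤ n + 1
        · rw [if_pos (by omega : size - (li + 1) ≤ n), if_pos h2]
          have hs : size - li = (size - (li + 1)) + 1 := by omega
          rw [hs, words_succ]; simp
        · rw [if_neg (by omega : ¬ size - (li + 1) ≤ n), if_neg h2]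
          rw [words_succ]
          simp only [Sum.inr.injEq, Prod.mk.injEq, List.append_assoc, List.singleton_append]
          exact ⟨by omega, trivial⟩
      · have hn0 : n = 0 := by omega
        subst hn0
        rw [aJ]
        rw [if_neg (by omega : ¬ size - li ≤ 1)]
        simp [words]
  
-- closed form of one ≤25-step stretch of B's loop that stays inside one 25-word block
-- (offset t into the block; block belongs to divider label i, 2 ≤ i ≤ 9)
theorem bLoop_block (index : Int) (list : List String) (size : Nat) :
    ∀ m t li i buf, 1 ≤ m → t + m ≤ 25 → li + m ≤ size → 2 ≤ i → i ≤ 9 →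
      li % 200 = 25 * (i - 2) + t →
      bLoop index list size m li buf =
        buf ++ (if t = 0 ∧ i = 2 then [PySem.Int.toStr (index + ((li / 200 : Nat) : Int)) ++ "\n"] else [])
            ++ words list li m
            ++ (if t + m = 25 ∧ li + m < size ∧ i ≤ 8 then ["*_" ++ PySem.Int.toStr (i : Int) ++ "_*\n"] else []) := by
  intro m
  induction m with
  | zero => omega
  | succ n ih =>
    intro t li i buf _ ht hsz hi2 hi9 hmod
    rw [bLoop]
    have hr0 : li % 200 = 0 ↔ (t = 0 ∧ i = 2) := by omega
    have hdiv : (li ≠ size - 1 ∧ li % 200 % 25 = 24 ∧ li % 200 ≠ 199) ↔ (t + 1 = 25 ∧ li + 1 < size ∧ i ≤ 8) := by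
      constructor
      · rintro ⟨h1, h2, h3⟩
        refine ⟨by omega, by omega, by omega⟩
      · rintro ⟨h1, h2, h3⟩
        refine ⟨by omega, by omega, by omega⟩
    cases n with
    | zero =>
      by_cases hh : li % 200 = 0
      · rw [if_pos hh, bLoop]
        have := hr0.mp hh
        by_cases hd : li ≠ size - 1 ∧ li % 200 % 25 = 24 ∧ li % 200 ≠ 199
        · rw [if_pos hd]
          have hd' := hdiv.mp hd
          rw [if_pos this, if_pos hd']
          have hl : (i : Int) = ((li % 200) / 25 + 2 : Nat) := by
            have : (li % 200) / 25 = i - 2 := by omega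
            rw [this]; omega
          simp [words, hl]
        · rw [if_neg hd, if_pos this,
            if_neg (fun h => hd (hdiv.mpr h))]
          simp [words]
      · rw [if_neg hh, bLoop]
        rw [if_neg (fun h => hh (hr0.mpr h))]
        by_cases hd : li ≠ size - 1 ∧ li % 200 % 25 = 24 ∧ li % 200 ≠ 199
        · rw [if_pos hd, if_pos (hdiv.mp hd)]
          have hl : (i : Int) = ((li % 200) / 25 + 2 : Nat) := by
            have : (li % 200) / 25 = i - 2 := by omega
            rw [this]; omega
          simp [words, hl]
        · rw [if_neg hd, if_neg (fun h => hd (hdiv.mpr h))]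
          simp [words]
    | succ n' =>
      -- more than one step left: this step emits no divider (its offset t < 24)
      have hndiv : ¬ (li ≠ size - 1 ∧ li % 200 % 25 = 24 ∧ li % 200 ≠ 199) := by
        rintro ⟨_, h2, _⟩; omega
      rw [if_neg hndiv]
      rw [ih (t + 1) (li + 1) i _ (by omega) (by omega) (by omega) hi2 hi9 (by omega)]
      rw [if_neg (by omega : ¬ (t + 1 = 0 ∧ i = 2))]
      by_cases hh : li % 200 = 0
      · rw [if_pos hh]
        have := hr0.mp hh
        rw [if_pos this]
        have harith : (t + 1) + (n' + 1) = 25 ∧ li + 1 + (n' + 1) < size ∧ i ≤ 8 ↔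
            t + (n' + 1 + 1) = 25 ∧ li + (n' + 1 + 1) < size ∧ i ≤ 8 := by omega
        have hdd : (li + 1) / 200 = li / 200 := by omega
        by_cases hd2 : (t + 1) + (n' + 1) = 25 ∧ li + 1 + (n' + 1) < size ∧ i ≤ 8
        · rw [if_pos hd2, if_pos (harith.mp hd2)]
          simp [words_succ]
        · rw [if_neg hd2, if_neg (fun h => hd2 (harith.mpr h))]
          simp [words_succ]
      · rw [if_neg hh, if_neg (fun h => hh (hr0.mpr h))]
        have harith : (t + 1) + (n' + 1) = 25 ∧ li + 1 + (n' + 1) < size ∧ i ≤ 8 ↔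
            t + (n' + 1 + 1) = 25 ∧ li + (n' + 1 + 1) < size ∧ i ≤ 8 := by omega
        by_cases hd2 : (t + 1) + (n' + 1) = 25 ∧ li + 1 + (n' + 1) < size ∧ i ≤ 8
        · rw [if_pos hd2, if_pos (harith.mp hd2)]
          simp [words_succ]
        · rw [if_neg hd2, if_neg (fun h => hd2 (harith.mpr h))]
          simp [words_succ]

-- splitting B's loop
theorem bLoop_add (index : Int) (list : List String) (size : Nat) :
    ∀ m n g buf, bLoop index list size (m + n) g buf =
      bLoop index list size n (g + m) (bLoop index list size m g buf) := by
  intro m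
  induction m with
  | zero => intro n g buf; simp [bLoop]
  | succ k ih =>
    intro n g buf
    rw [show k + 1 + n = (k + n) + 1 by omega]
    rw [bLoop, bLoop]
    rw [ih]
    congr 1
    omega

-- A's middle loop (entered at i ≥ 3, i.e. after the block that carries the group header)
-- matches the corresponding stretch of B's loop
theorem aI_eq (index : Int) (list : List String) (size : Nat) :
    ∀ ifuel i li buf, i = 10 - ifuel → 3 ≤ i → i ≤ 9 → li < size →
      li % 200 = 25 * (i - 2) →
      aI list size ifuel i li buf =
        if size - li ≤ 25 * ifuel then Sum.inl (bLoop index list size (size - li) li buf)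
        else Sum.inr (li + 25 * ifuel, bLoop index list size (25 * ifuel) li buf) := by
  intro ifuel
  induction ifuel with
  | zero => omega
  | succ f ih =>
    intro i li buf hif hi3 hi9 hli hmod
    rw [aI]
    rw [aJ_eq list size 25 li buf (by omega) hli]
    by_cases h25 : size - li ≤ 25
    · rw [if_pos h25]
      rw [if_pos (by omega : size - li ≤ 25 * (f + 1))]
      rw [bLoop_block index list size (size - li) 0 li i buf (by omega) (by omega) (by omega)
        (by omega) hi9 (by omega)]
      rw [if_neg (by omega : ¬ (0 = 0 ∧ i = 2))]
      rw [if_neg (by omega : ¬ (0 + (size - li) = 25 ∧ li + (size - li) < size ∧ i ≤ 8))]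
      simp
    · rw [if_neg h25]
      dsimp only
      by_cases hi8 : i < 9
      · rw [if_pos hi8]
        have hf1 : 1 ≤ f := by omega
        rw [ih (i + 1) (li + 25) _ (by omega) (by omega) (by omega) (by omega) (by omega)]
        have hb : bLoop index list size 25 li buf =
            buf ++ words list li 25 ++ ["*_" ++ PySem.Int.toStr (i : Int) ++ "_*\n"] := by
          rw [bLoop_block index list size 25 0 li i buf (by omega) (by omega) (by omega)
            (by omega) hi9 (by omega)]
          rw [if_neg (by omega : ¬ (0 = 0 ∧ i = 2))]
          rw [if_pos (by omega : 0 + 25 = 25 ∧ li + 25 < size ∧ i ≤ 8)]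
          simp
        by_cases h2 : size - (li + 25) ≤ 25 * f
        · rw [if_pos h2, if_pos (by omega : size - li ≤ 25 * (f + 1))]
          have : size - li = 25 + (size - (li + 25)) := by omega
          rw [this, bLoop_add, hb]
        · rw [if_neg h2, if_neg (by omega : ¬ size - li ≤ 25 * (f + 1))]
          have : (25 : Nat) * (f + 1) = 25 + 25 * f := by ring
          rw [this, bLoop_add, hb]
          simp [Nat.add_assoc]
      · -- i = 9: last block of the group, no divider, middle loop falls through
        have hi : i = 9 := by omega
        have hf : f = 0 := by omega
        subst hi; subst hf
        rw [if_neg (by omega : ¬ (9 : Nat) < 9)]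
        rw [aI]
        rw [if_neg (by omega : ¬ size - li ≤ 25 * 1)]
        rw [bLoop_block index list size 25 0 li 9 buf (by omega) (by omega) (by omega)
          (by omega) (by omega) (by omega)]
        rw [if_neg (by omega : ¬ ((0 : Nat) = 0 ∧ (9 : Nat) = 2))]
        rw [if_neg (by omega : ¬ (0 + 25 = 25 ∧ li + 25 < size ∧ (9 : Nat) ≤ 8))]
        simp

-- A's outer loop matches B's loop, from any group start
theorem aX_eq (index0 : Int) (list : List String) (size : Nat) :
    ∀ xfuel li index buf, li % 200 = 0 → li < size → size - li ≤ 200 * xfuel →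
      index = index0 + ((li / 200 : Nat) : Int) →
      aX list size xfuel index li buf = bLoop index0 list size (size - li) li buf := by
  intro xfuel
  induction xfuel with
  | zero => omega
  | succ n ih =>
    intro li index buf hmod hli hfuel hidx
    rw [aX]
    rw [aI]
    rw [aJ_eq list size 25 li _ (by omega) hli]
    by_cases h25 : size - li ≤ 25
    · rw [if_pos h25]
      rw [bLoop_block index0 list size (size - li) 0 li 2 buf (by omega) (by omega) (by omega)
        (by omega) (by omega) (by omega)]
      rw [if_pos (by omega : (0 : Nat) = 0 ∧ (2 : Nat) = 2)]
      rw [if_neg (by omega : ¬ (0 + (size - li) = 25 ∧ li + (size - li) < size ∧ (2 : Nat) ≤ 8))]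
      simp [hidx]
    · rw [if_neg h25]
      dsimp only
      rw [if_pos (by omega : (2 : Nat) < 9)]
      have hb25 : bLoop index0 list size 25 li buf =
          buf ++ [PySem.Int.toStr (index0 + ((li / 200 : Nat) : Int)) ++ "\n"]
              ++ words list li 25 ++ ["*_" ++ PySem.Int.toStr ((2 : Nat) : Int) ++ "_*\n"] := by
        rw [bLoop_block index0 list size 25 0 li 2 buf (by omega) (by omega) (by omega)
          (by omega) (by omega) (by omega)]
        rw [if_pos (by omega : (0 : Nat) = 0 ∧ (2 : Nat) = 2)]
        rw [if_pos (by omega : 0 + 25 = 25 ∧ li + 25 < size ∧ (2 : Nat) ≤ 8)]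
      rw [aI_eq index0 list size 7 3 (li + 25) _ (by omega) (by omega) (by omega) (by omega)
        (by omega)]
      by_cases h2 : size - (li + 25) ≤ 25 * 7
      · rw [if_pos h2]
        dsimp only
        have : size - li = 25 + (size - (li + 25)) := by omega
        rw [this, bLoop_add, hb25, hidx]
      · rw [if_neg h2]
        dsimp only
        have hsplit : li + 25 + 25 * 7 = li + 200 := by omega
        rw [hsplit]
        rw [ih (li + 200) (index + 1) _ (by omega) (by omega) (by omega) (by omega)]
        have h1 : size - li = 25 + (size - (li + 25)) := by omega
        have h2' : size - (li + 25) = 25 * 7 + (size - (li + 200)) := by omega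
        rw [h1, bLoop_add, h2', bLoop_add, hb25, hidx]

-- ===== VERDICT (by name: the statement is the Claim_ definition above) =====
theorem set_dict_spec : Claim_equal_set_dict := by
  unfold Claim_equal_set_dict
  intro index list _
  unfold Spec_set_dict set_dict set_dict_alt
  cases h : list.length with
  | zero => simp [aX, bLoop]
  | succ k =>
    rw [aX_eq index list (k + 1) (k + 1) 0 index [] (by omega) (by omega) (by omega) (by simp)]
    simp
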